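-- pv_equiv track=rewrite | github.com/lucashochberg/cs | hochberg_lucas_strings.py | sorted_name
-- ===== SOURCE A (Python) =====
-- def sorted_name(user_input):                                                                                            # creates a function for number 12
--     '''
--     Prints a sorted list of all the characters in the input
--
--     Args:
--         user_input: What the user puts as their name
--
--     Returns:
--         char_list: A sorted list of all characters
--
--     Raises:
--         None
--     '''
--     char_list = []
--     for char in user_input:
--         if char != " ":
--             char_list.append(char)
--     for i in range(len(char_list)):
--         for j in range(0, len(char_list) - i - 1):
--             if char_list[j] > char_list[j + 1]:
--                 char_list[j], char_list[j + 1] = char_list[j + 1], char_list[j]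
--     joiner = ''.join(char_list)
--     return joiner
-- ===== SOURCE B (Python) =====
-- def sorted_name(user_input):
--     counts = {}
--     for ch in user_input:
--         if ch != " ":
--             counts[ch] = counts.get(ch, 0) + 1
--     ords = [ord(c) for c in counts]
--     if not ords:
--         return ""
--     lo = min(ords)
--     hi = max(ords)
--     pieces = []
--     for cp in range(lo, hi + 1):
--         c = chr(cp)
--         pieces.append(c * counts.get(c, 0))
--     return "".join(pieces)
-- ===== Notes on version B (the rewrite author's own statement) =====
-- stated objective: faster
-- what changed: Replaces the hand-written bubble sort (nested index loops with adjacent swaps) by a counting sort: one pass builds a character-frequency table, then one pass over the code-point range min..max expands each character count times.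
import Mathlib
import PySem

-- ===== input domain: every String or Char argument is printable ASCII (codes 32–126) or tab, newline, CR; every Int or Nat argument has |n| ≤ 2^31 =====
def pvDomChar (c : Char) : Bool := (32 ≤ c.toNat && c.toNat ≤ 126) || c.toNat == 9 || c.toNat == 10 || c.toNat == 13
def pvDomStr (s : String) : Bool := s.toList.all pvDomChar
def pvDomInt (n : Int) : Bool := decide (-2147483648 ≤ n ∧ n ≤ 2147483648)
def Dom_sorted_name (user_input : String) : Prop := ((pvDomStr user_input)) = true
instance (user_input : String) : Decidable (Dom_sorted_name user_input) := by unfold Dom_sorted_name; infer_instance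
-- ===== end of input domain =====

-- B replaces A's hand-written bubble sort by a counting sort (frequency table, then one
-- expansion pass over the code-point range); objective: faster.

-- ===== PORT A =====
-- A's inner loop 'for j in range(0, len-i-1): compare/swap char_list[j], char_list[j+1]' as
-- the obvious structural recursion over the same state: fuel k = number of remaining
-- comparisons, the list head is position j, the larger element is carried rightward.
def pvPass : Nat → List Char → List Char
  | k + 1, a :: b :: t => if a > b then b :: pvPass k (a :: t) else a :: pvPass k (b :: t)
  | _, l => l

def sorted_name (user_input : String) : String :=
  let char_list : List Char :=
    user_input.toList.foldl (fun acc char => if char != ' ' then acc ++ [char] else acc) []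
  let n := char_list.length
  let sorted := (List.range n).foldl (fun l i => pvPass (n - i - 1) l) char_list
  String.ofList sorted

-- ===== PORT B =====
def sorted_name_alt (user_input : String) : String :=
  let counts : PySem.Dict Char Int :=
    user_input.toList.foldl
      (fun d ch => if ch != ' ' then d.insert ch (d.getD ch 0 + 1) else d) PySem.Dict.empty
  let ords : List Int := counts.keys.map (fun c => (c.toNat : Int))
  match ords with
  | [] => ""
  | o :: os =>
    let lo := os.foldl min o      -- min(ords)
    let hi := os.foldl max o      -- max(ords)
    let out : List Char :=
      (PySem.List.pyRange lo (hi + 1) 1).foldl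
        (fun acc cp =>
          let c := Char.ofNat cp.toNat
          acc ++ PySem.List.pyRepeat [c] (counts.getD c 0)) []
    String.ofList out

-- ===== PRECONDITION & SPEC =====
def Spec_sorted_name (user_input : String) (out : String) : Prop := out = sorted_name_alt user_input
instance (user_input : String) (out : String) : Decidable (Spec_sorted_name user_input out) := by unfold Spec_sorted_name; infer_instance

-- ===== CLAIM (what is proved, stated in full; the proofs are below) =====
def Claim_equal_sorted_name : Prop := ∀ (user_input : String), Dom_sorted_name user_input → Spec_sorted_name user_input (sorted_name user_input)

-- ===== LEMMAS AND PROOFS =====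

theorem pvCharLtIff (a b : Char) : a < b ↔ a.toNat < b.toNat := by
  rw [Char.lt_def, UInt32.lt_iff_toNat_lt]; exact Iff.rfl

theorem pvToNatOfNat (n : Nat) (h : n < 55296) : (Char.ofNat n).toNat = n := by
  rw [Char.toNat_ofNat, if_pos (Or.inl h : Nat.isValidChar n)]

-- one bubble pass over the whole remaining prefix: ends with a maximum
theorem pvPass_last : ∀ (t : List Char) (a : Char), ∃ r m, pvPass t.length (a :: t) = r ++ [m] ∧
    (a :: t).Perm (r ++ [m]) ∧ (∀ x ∈ r ++ [m], x ≤ m) := by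
  intro t
  induction t with
  | nil => intro a; exact ⟨[], a, rfl, .refl _, by simp⟩
  | cons b t' ih =>
    intro a
    simp only [List.length_cons, pvPass]
    split
    next hab =>
      obtain ⟨r, m, he, hp, hm⟩ := ih a
      refine ⟨b :: r, m, by rw [List.cons_append, he], ?_, ?_⟩
      · exact ((List.Perm.swap b a t').trans (hp.cons b))
      · intro x hx
        rw [List.cons_append] at hx
        rcases List.mem_cons.mp hx with rfl | hx
        · exact le_trans (le_of_lt hab) (hm a (hp.mem_iff.mp (by simp)))
        · exact hm x hx
    next hab =>
      obtain ⟨r, m, he, hp, hm⟩ := ih b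
      refine ⟨a :: r, m, by rw [List.cons_append, he], ?_, ?_⟩
      · exact hp.cons a
      · intro x hx
        rw [List.cons_append] at hx
        rcases List.mem_cons.mp hx with rfl | hx
        · exact le_trans (le_of_not_gt hab) (hm b (hp.mem_iff.mp (by simp)))
        · exact hm x hx

-- a pass whose fuel stays inside the prefix never touches the suffix
theorem pvPass_append : ∀ (k : Nat) (p s : List Char), k < p.length →
    pvPass k (p ++ s) = pvPass k p ++ s := by
  intro k
  induction k with
  | zero => intro p s _; cases p <;> cases s <;> simp [pvPass]
  | succ k ih =>
    intro p s hk
    match p, hk with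
    | [a], hk =>
      simp at hk
    | a :: b :: t, hk =>
      simp only [List.cons_append, pvPass]
      split
      · rw [← List.cons_append, ih (a :: t) s (by simpa using Nat.lt_of_succ_lt_succ hk)]; simp
      · rw [← List.cons_append, ih (b :: t) s (by simpa using Nat.lt_of_succ_lt_succ hk)]; simp

-- bubble-sort invariant: after j outer iterations the last j positions hold a sorted
-- suffix dominating the unsorted prefix
theorem pvOuter_inv (cl : List Char) : ∀ (j : Nat), j ≤ cl.length →
    ∃ p s, (List.range j).foldl (fun l i => pvPass (cl.length - i - 1) l) cl = p ++ s ∧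
      p.length = cl.length - j ∧ s.Pairwise (· ≤ ·) ∧
      (∀ x ∈ p, ∀ y ∈ s, x ≤ y) ∧ (p ++ s).Perm cl := by
  intro j
  induction j with
  | zero => exact fun _ => ⟨cl, [], by simp, by simp, by simp, by simp, by simp⟩
  | succ j ih =>
    intro hj
    obtain ⟨p, s, he, hlen, hsort, hle, hperm⟩ := ih (Nat.le_of_succ_le hj)
    rw [List.range_succ, List.foldl_append, List.foldl_cons, List.foldl_nil, he]
    have hpn : 1 ≤ p.length := by omega
    obtain ⟨a, t, rfl⟩ : ∃ a t, p = a :: t := by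
      cases p with
      | nil => simp at hpn
      | cons a t => exact ⟨a, t, rfl⟩
    have hfuel : cl.length - j - 1 = t.length := by simp at hlen; omega
    rw [pvPass_append _ _ _ (by simp; omega), hfuel]
    obtain ⟨r, m, hre, hrp, hrm⟩ := pvPass_last t a
    refine ⟨r, m :: s, by rw [hre]; simp, ?_, ?_, ?_, ?_⟩
    · have := hrp.length_eq; simp at this hlen ⊢; omega
    · refine List.pairwise_cons.mpr ⟨?_, hsort⟩
      intro y hy
      exact hle m (hrp.mem_iff.mpr (by simp)) y hy
    · intro x hx y hy
      have hxp : x ∈ a :: t := hrp.mem_iff.mpr (List.mem_append_left _ hx)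
      rcases List.mem_cons.mp hy with rfl | hy
      · exact hrm x (List.mem_append_left _ hx)
      · exact hle x hxp y hy
    · have h1 : (r ++ m :: s).Perm ((r ++ [m]) ++ s) := by simp
      exact (h1.trans (hrp.symm.append_right s)).trans hperm

-- A's whole sort: a permutation of its input, pairwise sorted
theorem pvA_char (cl : List Char) :
    ((List.range cl.length).foldl (fun l i => pvPass (cl.length - i - 1) l) cl).Perm cl ∧
    ((List.range cl.length).foldl (fun l i => pvPass (cl.length - i - 1) l) cl).Pairwise (· ≤ ·) := by
  obtain ⟨p, s, he, hlen, hsort, _, hperm⟩ := pvOuter_inv cl cl.length le_rfl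
  have hp0 : p = [] := List.eq_nil_of_length_eq_zero (by omega)
  subst hp0
  rw [he]
  exact ⟨by simpa using hperm, by simpa using hsort⟩

-- blocks of a single repeated character, taken along a strictly increasing range, are sorted
theorem pvFlatPairwise (l : List Int) (g : Int → Char) (n : Int → Nat)
    (hmono : ∀ x ∈ l, ∀ y ∈ l, x < y → g x < g y) (hl : l.Pairwise (· < ·)) :
    (l.flatMap fun cp => List.replicate (n cp) (g cp)).Pairwise (· ≤ ·) := by
  induction l with
  | nil => simp
  | cons x l' ih =>
    rw [List.flatMap_cons, List.pairwise_append]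
    obtain ⟨hx, hl'⟩ := List.pairwise_cons.mp hl
    refine ⟨List.pairwise_replicate.mpr (by simp), ?_, ?_⟩
    · exact ih (fun a ha b hb => hmono a (by simp [ha]) b (by simp [hb])) hl'
    · intro a ha b hb
      obtain ⟨y, hy, hbr⟩ := List.mem_flatMap.mp hb
      rw [List.eq_of_mem_replicate ha, List.eq_of_mem_replicate hbr]
      exact le_of_lt (hmono x (by simp) y (by simp [hy]) (hx y hy))

-- summing an indicator over a duplicate-free list
theorem pvSumIte (l : List Int) (hn : l.Nodup) (k : Int) (v : Int → Nat) :
    (l.map fun cp => if cp = k then v cp else 0).sum = if k ∈ l then v k else 0 := by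
  induction l with
  | nil => simp
  | cons x l' ih =>
    obtain ⟨hx, hn'⟩ := List.nodup_cons.mp hn
    rw [List.map_cons, List.sum_cons, ih hn']
    by_cases hxk : x = k
    · subst hxk
      simp [hx]
    · simp [hxk, Ne.symm hxk]

-- counting one character in the flattened blocks
theorem pvCountFlat (c : Char) (l : List Int) (g : Int → Char) (n : Int → Nat) :
    ((l.flatMap fun cp => List.replicate (n cp) (g cp)).count c)
      = (l.map fun cp => if g cp = c then n cp else 0).sum := by
  induction l with
  | nil => simp
  | cons x l' ih =>
    rw [List.flatMap_cons, List.count_append, ih, List.map_cons, List.sum_cons,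
      List.count_replicate]
    by_cases h : g x = c <;> simp [h]

-- ===== VERDICT (by name: the statement is the Claim_ definition above) =====
theorem sorted_name_spec : Claim_equal_sorted_name := by
  intro u hdom
  unfold Spec_sorted_name sorted_name sorted_name_alt
  have hcl : u.toList.foldl (fun acc char => if char != ' ' then acc ++ [char] else acc) []
      = u.toList.filter (fun c => c != ' ') := by
    rw [PySem.List.foldl_if_eq_foldl_filter, PySem.List.foldl_append_singleton]
    simp
  have hcounts : u.toList.foldl
      (fun d ch => if ch != ' ' then d.insert ch (d.getD ch 0 + 1) else d) PySem.Dict.empty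
      = PySem.Dict.counter (u.toList.filter (fun c => c != ' ')) := by
    rw [PySem.List.foldl_if_eq_foldl_filter, PySem.Dict.foldl_insert_getD_add_one_eq_counter]
  simp only [hcl, hcounts]
  set filt := List.filter (fun c => c != ' ') u.toList with hfilt
  have hchar : ∀ c ∈ filt, c.toNat ≤ 126 := by
    intro c hc
    have hd := List.all_eq_true.mp hdom c (List.mem_of_mem_filter hc)
    unfold pvDomChar at hd
    simp at hd
    omega
  obtain ⟨hApm, hAsort⟩ := pvA_char filt
  have hmemkeys : ∀ c : Char, c ∈ (PySem.Dict.counter filt).keys ↔ c ∈ filt := by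
    intro c
    rw [PySem.Dict.keys_counter]
    exact PySem.Set.mem_ofList ..
  rcases hords : List.map (fun c => (c.toNat : Int)) (PySem.Dict.counter filt).keys with _ | ⟨o, os⟩
  · -- no non-space character at all
    rw [hords]
    have hnil : filt = [] := by
      cases hf : filt with
      | nil => rfl
      | cons c t =>
        have : (c.toNat : Int) ∈ List.map (fun c => (c.toNat : Int)) (PySem.Dict.counter filt).keys :=
          List.mem_map.mpr ⟨c, (hmemkeys c).mpr (by rw [hf]; simp), rfl⟩
        rw [hords] at this
        simp at this
    rw [hnil]
    rfl
  · -- at least one character: counting-sort expansion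
    rw [hords]
    have hmemords : ∀ x, x ∈ o :: os ↔ ∃ c ∈ filt, x = (c.toNat : Int) := by
      intro x
      rw [← hords]
      simp only [List.mem_map]
      constructor
      · rintro ⟨c, hk, rfl⟩; exact ⟨c, (hmemkeys c).mp hk, rfl⟩
      · rintro ⟨c, hk, rfl⟩; exact ⟨c, (hmemkeys c).mpr hk, rfl⟩
    set lo := List.foldl min o os with hlo
    set hi := List.foldl max o os with hhi
    have hbound : ∀ x ∈ o :: os, 0 ≤ x ∧ x ≤ 126 := by
      intro x hx
      obtain ⟨c, hc, rfl⟩ := (hmemords x).mp hx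
      have := hchar c hc
      omega
    have hlomem : lo ∈ o :: os := by
      rcases PySem.List.foldl_min_mem os o with h | h
      · simp [hlo, h]
      · simp [hlo, List.mem_cons]; right; exact h
    have hhimem : hi ∈ o :: os := by
      rcases PySem.List.foldl_max_mem os o with h | h
      · simp [hhi, h]
      · simp [hhi, List.mem_cons]; right; exact h
    have hlo0 : 0 ≤ lo := (hbound lo hlomem).1
    have hhi126 : hi ≤ 126 := (hbound hi hhimem).2
    have hext : ∀ x ∈ o :: os, lo ≤ x ∧ x ≤ hi := by
      intro x hx
      rcases List.mem_cons.mp hx with rfl | hx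
      · exact ⟨(PySem.List.foldl_min_le os x).1, (PySem.List.le_foldl_max os x).1⟩
      · exact ⟨(PySem.List.foldl_min_le os o).2 x hx, (PySem.List.le_foldl_max os o).2 x hx⟩
    have hout : List.foldl
        (fun acc cp => acc ++ PySem.List.pyRepeat [Char.ofNat cp.toNat]
          ((PySem.Dict.counter filt).getD (Char.ofNat cp.toNat) 0)) []
        (PySem.List.pyRange lo (hi + 1) 1)
        = (PySem.List.pyRange lo (hi + 1) 1).flatMap
            (fun cp => List.replicate ((PySem.Dict.counter filt).getD (Char.ofNat cp.toNat) 0).toNat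
              (Char.ofNat cp.toNat)) := by
      rw [PySem.List.foldl_append_eq_flatMap]
      apply List.flatMap_congr
      intro cp _
      rw [PySem.List.pyRepeat_singleton]
    have hrb : ∀ cp ∈ PySem.List.pyRange lo (hi + 1) 1, 0 ≤ cp ∧ cp ≤ 126 := by
      intro cp hcp
      obtain ⟨h1, h2⟩ := (PySem.List.mem_pyRange_one).mp hcp
      omega
    have htn : ∀ cp ∈ PySem.List.pyRange lo (hi + 1) 1, (Char.ofNat cp.toNat).toNat = cp.toNat := by
      intro cp hcp
      exact pvToNatOfNat _ (by have := (hrb cp hcp).2; omega)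
    have hBsort : ((PySem.List.pyRange lo (hi + 1) 1).flatMap
        (fun cp => List.replicate ((PySem.Dict.counter filt).getD (Char.ofNat cp.toNat) 0).toNat
          (Char.ofNat cp.toNat))).Pairwise (· ≤ ·) := by
      apply pvFlatPairwise
      · intro x hx y hy hxy
        rw [pvCharLtIff, htn x hx, htn y hy]
        have := (hrb x hx).1
        omega
      · exact PySem.List.pairwise_lt_pyRange_one ..
    have hBperm : ((PySem.List.pyRange lo (hi + 1) 1).flatMap
        (fun cp => List.replicate ((PySem.Dict.counter filt).getD (Char.ofNat cp.toNat) 0).toNat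
          (Char.ofNat cp.toNat))).Perm filt := by
      rw [List.perm_iff_count]
      intro c
      rw [pvCountFlat]
      by_cases hc : c ∈ filt
      · have hk : (c.toNat : Int) ∈ o :: os := (hmemords _).mpr ⟨c, hc, rfl⟩
        have hkr : (c.toNat : Int) ∈ PySem.List.pyRange lo (hi + 1) 1 := by
          rw [PySem.List.mem_pyRange_one]
          have := hext _ hk
          omega
        have hcong : ∀ cp ∈ PySem.List.pyRange lo (hi + 1) 1,
            (if Char.ofNat cp.toNat = c then ((PySem.Dict.counter filt).getD (Char.ofNat cp.toNat) 0).toNat else 0)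
              = (if cp = (c.toNat : Int) then filt.count c else 0) := by
          intro cp hcp
          by_cases h : Char.ofNat cp.toNat = c
          · have hcpk : cp = (c.toNat : Int) := by
              have h1 := htn cp hcp
              rw [h] at h1
              have := (hrb cp hcp).1
              omega
            rw [if_pos h, if_pos hcpk, h, PySem.Dict.getD_counter]
            simp
          · have hne : cp ≠ (c.toNat : Int) := by
              intro e
              apply h
              rw [e]
              simp [Char.ofNat_toNat]
            rw [if_neg h, if_neg hne]
        rw [List.map_congr_left hcong,
          pvSumIte _ (PySem.List.nodup_pyRange_one ..) _ (fun _ => filt.count c), if_pos hkr]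
      · have h0 : filt.count c = 0 := List.count_eq_zero.mpr hc
        have hcong : ∀ cp ∈ PySem.List.pyRange lo (hi + 1) 1,
            (if Char.ofNat cp.toNat = c then ((PySem.Dict.counter filt).getD (Char.ofNat cp.toNat) 0).toNat else 0)
              = 0 := by
          intro cp _
          by_cases h : Char.ofNat cp.toNat = c
          · rw [if_pos h, h, PySem.Dict.getD_counter, h0]
            simp
          · rw [if_neg h]
        rw [List.map_congr_left hcong, h0]
        simp
    change _ = String.ofList (List.foldl
      (fun acc cp => acc ++ PySem.List.pyRepeat [Char.ofNat cp.toNat]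
        ((PySem.Dict.counter filt).getD (Char.ofNat cp.toNat) 0)) []
      (PySem.List.pyRange lo (hi + 1) 1))
    rw [hout]
    congr 1
    exact (hApm.trans hBperm.symm).eq_of_pairwise (fun a b _ _ h1 h2 => le_antisymm h1 h2) hAsort hBsort
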